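-- pv_equiv track=rewrite | github.com/alexpitcher/cme-tools-api | app/utils/ios_parser.py | extract_config_section
-- ===== SOURCE A (Python) =====
-- def extract_config_section(full_config: str, section_keyword: str) -> str:
--     """Extract a named section from running-config output.
--
--     Works for sections that begin with a keyword line and end when
--     indentation returns to column 0 (or a '!' separator).
--     """
--     lines = full_config.splitlines()
--     capturing = False
--     captured: list[str] = []
--
--     for line in lines:
--         if not capturing:
--             if line.strip().lower().startswith(section_keyword.lower()):
--                 capturing = True
--                 captured.append(line)
--         else:
--             if line and not line[0].isspace() and line.strip() != "!":
--                 break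
--             captured.append(line)
--
--     return "\n".join(captured)
-- ===== SOURCE B (Python) =====
-- def extract_config_section(full_config: str, section_keyword: str) -> str:
--     """Index-arithmetic version: compute the list of header indices and the
--     list of terminator indices up front, then take a slice of the lines.
--     No sequential state machine: the answer is lines[s:e] where s is the
--     first header index and e the first terminator index after s."""
--     lines = full_config.splitlines()
--     kw = section_keyword.lower()
--     starts = [i for i, l in enumerate(lines) if l.strip().lower().startswith(kw)]
--     if not starts:
--         return ""
--     s = starts[0]
--     stops = [i for i, l in enumerate(lines)
--              if i > s and l and not l[0].isspace() and l.strip() != "!"]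
--     e = stops[0] if stops else len(lines)
--     return "\n".join(lines[s:e])
-- ===== Notes on version B (the rewrite author's own statement) =====
-- stated objective: alternative
-- what changed: Replaces A's single-pass boolean state machine with index arithmetic: two enumerate-based comprehensions compute the header-index list and the terminator-index list, and the answer is the slice lines[s:e] between the first header index and the first terminator index after it.
import Mathlib
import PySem

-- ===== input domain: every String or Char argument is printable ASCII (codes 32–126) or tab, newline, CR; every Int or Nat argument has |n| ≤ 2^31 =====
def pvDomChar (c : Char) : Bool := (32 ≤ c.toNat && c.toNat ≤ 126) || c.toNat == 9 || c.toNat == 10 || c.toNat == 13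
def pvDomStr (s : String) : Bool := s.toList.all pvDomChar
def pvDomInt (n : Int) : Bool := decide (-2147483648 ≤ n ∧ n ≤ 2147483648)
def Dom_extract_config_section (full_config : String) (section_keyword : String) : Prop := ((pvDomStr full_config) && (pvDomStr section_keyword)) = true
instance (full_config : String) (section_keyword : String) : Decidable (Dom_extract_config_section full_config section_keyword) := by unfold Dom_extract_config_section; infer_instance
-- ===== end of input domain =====

-- B replaces A's one-pass boolean state machine by index arithmetic (two index comprehensions + a slice); alternative structure, same cost.

-- ===== PORT A =====
-- line.strip().lower().startswith(section_keyword.lower())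
def matchesA (kw line : String) : Bool :=
  PySem.Str.startswith (PySem.Str.lower (PySem.Str.strip line)) (PySem.Str.lower kw)

-- line and not line[0].isspace() and line.strip() != "!"
def stopA (line : String) : Bool :=
  match line.toList with
  | [] => false
  | c :: _ => !PySem.Chars.isspace c && PySem.Str.strip line != "!"

def loopA (kw : String) : List String → Bool → List String → List String
  | [], _, captured => captured
  | line :: rest, capturing, captured =>
    if !capturing then
      if matchesA kw line then loopA kw rest true (captured ++ [line])
      else loopA kw rest false captured
    else
      if stopA line then captured
      else loopA kw rest true (captured ++ [line])

def extract_config_section (full_config : String) (section_keyword : String) : String :=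
  PySem.Str.join "\n" (loopA section_keyword (PySem.Str.splitlines full_config) false [])

-- ===== PORT B =====
-- l.strip().lower().startswith(kw)  (kw already lowered once)
def matchesB (kw line : String) : Bool :=
  PySem.Str.startswith (PySem.Str.lower (PySem.Str.strip line)) kw

-- l and not l[0].isspace() and l.strip() != "!"
def stopB (line : String) : Bool :=
  match line.toList with
  | [] => false
  | c :: _ => !PySem.Chars.isspace c && PySem.Str.strip line != "!"

def extract_config_section_alt (full_config : String) (section_keyword : String) : String :=
  let lines := PySem.Str.splitlines full_config
  let kw := PySem.Str.lower section_keyword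
  let starts := ((PySem.List.enumerate lines 0).filter (fun p => matchesB kw p.2)).map (fun p => p.1)
  match starts with
  | [] => ""
  | s :: _ =>
    let stops := ((PySem.List.enumerate lines 0).filter
        (fun p => decide (s < p.1) && stopB p.2)).map (fun p => p.1)
    let e : Int := match stops with | [] => (lines.length : Int) | t :: _ => t
    PySem.Str.join "\n" (PySem.List.slice lines (some s) (some e))

-- ===== PRECONDITION & SPEC =====
def Spec_extract_config_section (full_config : String) (section_keyword : String) (out : String) : Prop := out = extract_config_section_alt full_config section_keyword
instance (full_config : String) (section_keyword : String) (out : String) : Decidable (Spec_extract_config_section full_config section_keyword out) := by unfold Spec_extract_config_section; infer_instance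

-- ===== CLAIM (what is proved, stated in full; the proofs are below) =====
def Claim_equal_extract_config_section : Prop := ∀ (full_config : String) (section_keyword : String), Dom_extract_config_section full_config section_keyword → Spec_extract_config_section full_config section_keyword (extract_config_section full_config section_keyword)

-- ===== LEMMAS AND PROOFS =====

-- proof-only helpers: a locate-then-scan characterisation of A's loop
def findStartI (kw : String) : List String → Option (String × List String)
  | [] => none
  | line :: rest => if matchesB kw line then some (line, rest) else findStartI kw rest

def scanI : List String → List String
  | [] => []
  | line :: rest => if stopB line then [] else line :: scanI rest

theorem loopA_capturing (kw : String) (ls : List String) :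
    ∀ captured, loopA kw ls true captured = captured ++ scanI ls := by
  induction ls with
  | nil => intro c; simp [loopA, scanI]
  | cons l rest ih =>
    intro c
    have hs : stopA l = stopB l := rfl
    by_cases h : stopB l
    · simp [loopA, scanI, hs, h]
    · simp [loopA, scanI, hs, h, ih]

theorem loopA_searching (kw : String) (ls : List String) :
    loopA kw ls false [] =
      (match findStartI (PySem.Str.lower kw) ls with
       | none => []
       | some (h, rest) => h :: scanI rest) := by
  induction ls with
  | nil => simp [loopA, findStartI]
  | cons l rest ih =>
    by_cases h : matchesA kw l
    · have hb : matchesB (PySem.Str.lower kw) l = true := h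
      simp [loopA, findStartI, h, hb, loopA_capturing]
    · have hb : matchesB (PySem.Str.lower kw) l = false := by
        simpa [matchesA, matchesB] using h
      simp [loopA, findStartI, h, hb, ih]

-- head of the index comprehension = findIdx
theorem headFiltEnum (f : String → Bool) : ∀ (ls : List String) (n : Int),
    ((((PySem.List.enumerate ls n).filter (fun p => f p.2)).map (fun p => p.1))).head? =
      (if ls.findIdx f < ls.length then some (n + (ls.findIdx f : Int)) else none) := by
  intro ls
  induction ls with
  | nil => intro n; simp
  | cons l rest ih =>
    intro n
    by_cases h : f l
    · simp [PySem.List.enumerate_cons, h, List.findIdx_cons]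
    · simp only [PySem.List.enumerate_cons, List.filter_cons, h, List.findIdx_cons,
        cond_false, Bool.false_eq_true, if_false]
      rw [ih (n + 1)]
      by_cases hlt : rest.findIdx f < rest.length
      · have h2 : rest.findIdx f + 1 < rest.length + 1 := by omega
        simp only [List.length_cons]
        rw [if_pos hlt, if_pos h2]
        congr 1
        push_cast
        ring
      · simp only [hlt, if_false]
        have : ¬ (rest.findIdx f + 1 < rest.length + 1) := by omega
        simp [this]

-- findStartI in terms of findIdx
theorem findStartI_eq (kw : String) : ∀ (ls : List String),
    findStartI kw ls =
      (if h : ls.findIdx (matchesB kw) < ls.length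
       then some (ls[ls.findIdx (matchesB kw)], ls.drop (ls.findIdx (matchesB kw) + 1))
       else none) := by
  intro ls
  induction ls with
  | nil => simp [findStartI]
  | cons l rest ih =>
    by_cases h : matchesB kw l
    · simp [findStartI, h, List.findIdx_cons]
    · simp only [findStartI, h, Bool.false_eq_true, if_false, List.findIdx_cons, cond_false]
      rw [ih]
      by_cases hlt : rest.findIdx (matchesB kw) < rest.length
      · have h2 : rest.findIdx (matchesB kw) + 1 < rest.length + 1 := by omega
        simp [hlt, h2]
      · have h2 : ¬ (rest.findIdx (matchesB kw) + 1 < rest.length + 1) := by omega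
        simp [hlt, h2]

-- scanI is take-up-to-first-stop
theorem scanI_eq_take : ∀ (ls : List String), scanI ls = ls.take (ls.findIdx stopB) := by
  intro ls
  induction ls with
  | nil => simp [scanI]
  | cons l rest ih =>
    by_cases h : stopB l
    · simp [scanI, h, List.findIdx_cons]
    · simp [scanI, h, List.findIdx_cons, ih]

theorem enum_append : ∀ (xs ys : List String) (n : Int),
    PySem.List.enumerate (xs ++ ys) n =
      PySem.List.enumerate xs n ++ PySem.List.enumerate ys (n + xs.length) := by
  intro xs
  induction xs with
  | nil => intro ys n; simp
  | cons x xs ih =>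
    intro ys n
    simp [List.cons_append, PySem.List.enumerate_cons, ih]
    congr 1
    ring

theorem filt_prefix_nil (g : String → Bool) (s : Int) : ∀ (xs : List String) (n : Int),
    n + (xs.length : Int) ≤ s + 1 →
    (PySem.List.enumerate xs n).filter (fun p => decide (s < p.1) && g p.2) = [] := by
  intro xs
  induction xs with
  | nil => intro n _; simp
  | cons x xs ih =>
    intro n hn
    simp only [List.length_cons] at hn
    have h1 : ¬ (s < n) := by omega
    simp [PySem.List.enumerate_cons, h1, ih (n + 1) (by omega)]

theorem filt_suffix_drop (g : String → Bool) (s : Int) : ∀ (xs : List String) (n : Int),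
    s + 1 ≤ n →
    (PySem.List.enumerate xs n).filter (fun p => decide (s < p.1) && g p.2) =
      (PySem.List.enumerate xs n).filter (fun p => g p.2) := by
  intro xs
  induction xs with
  | nil => intro n _; simp
  | cons x xs ih =>
    intro n hn
    have h1 : s < n := by omega
    simp only [PySem.List.enumerate_cons, List.filter_cons, decide_eq_true h1, Bool.true_and]
    rw [ih (n + 1) (by omega)]

-- ===== VERDICT (by name: the statement is the Claim_ definition above) =====
theorem extract_config_section_spec : Claim_equal_extract_config_section := by
  intro fc skw _
  unfold Spec_extract_config_section extract_config_section extract_config_section_alt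
  rw [loopA_searching, findStartI_eq]
  dsimp only
  set lines := PySem.Str.splitlines fc with hlines
  set kw := PySem.Str.lower skw with hkw
  set s := lines.findIdx (matchesB kw) with hs
  have hstarts := headFiltEnum (matchesB kw) lines 0
  by_cases hlt : s < lines.length
  · -- a section header exists at index s
    rw [dif_pos hlt]
    rw [if_pos hlt] at hstarts
    rcases hh : (((PySem.List.enumerate lines 0).filter (fun p => matchesB kw p.2)).map (fun p => p.1)) with _ | ⟨s0, tl⟩
    · rw [hh] at hstarts; simp at hstarts
    · rw [hh] at hstarts
      simp only [List.head?_cons, Option.some.injEq] at hstarts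
      have hs0 : s0 = (s : Int) := by omega
      subst hs0
      rw [hh]
      dsimp only
      -- stops: split enumerate at s+1
      have hsplit : lines = lines.take (s + 1) ++ lines.drop (s + 1) := by simp
      have hlen : (lines.take (s + 1)).length = s + 1 := by
        simp [List.length_take]; omega
      have hstops :
          ((PySem.List.enumerate lines 0).filter (fun p => decide ((s : Int) < p.1) && stopB p.2)) =
            ((PySem.List.enumerate (lines.drop (s + 1)) ((s : Int) + 1)).filter (fun p => stopB p.2)) := by
        conv_lhs => rw [hsplit]
        rw [enum_append, List.filter_append, hlen,
          filt_prefix_nil stopB (s : Int) _ 0 (by omega),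
          filt_suffix_drop stopB (s : Int) _ _ (by push_cast; omega)]
        simp
      rw [hstops]
      set rest := lines.drop (s + 1) with hrest
      set t := rest.findIdx stopB with ht
      have hstopsHead := headFiltEnum stopB rest ((s : Int) + 1)
      rcases hh2 : (((PySem.List.enumerate rest ((s : Int) + 1)).filter (fun p => stopB p.2)).map (fun p => p.1)) with _ | ⟨t0, tl2⟩
      · -- no terminator after s: e = len(lines)
        rw [hh2] at hstopsHead
        simp only [List.head?_nil, ← ht] at hstopsHead
        rw [hh2]
        dsimp only
        have hnt : ¬ t < rest.length := by
          by_contra hc; simp [hc] at hstopsHead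
        have hrlen : rest.length = lines.length - (s + 1) := by simp [hrest]
        rw [PySem.List.slice_natCast lines s lines.length]
        rw [List.drop_eq_getElem_cons hlt]
        have hms : lines.length - s = (lines.length - (s + 1)) + 1 := by omega
        rw [hms, List.take_succ_cons]
        congr 1
        rw [scanI_eq_take, ← ht, ← hrest]
        have htlen : t = rest.length := by
          have := List.findIdx_le_length (p := stopB) (xs := rest); omega
        rw [htlen, List.take_length, ← hrlen, List.take_length]
      · -- first terminator at absolute index t0 = s+1+t
        rw [hh2] at hstopsHead
        simp only [List.head?_cons, ← ht] at hstopsHead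
        rw [hh2]
        dsimp only
        have hlt2 : t < rest.length := by
          by_contra hc; simp [hc] at hstopsHead
        rw [if_pos hlt2] at hstopsHead
        have ht0' := Option.some.inj hstopsHead
        have ht0 : t0 = ((s + 1 + t : Nat) : Int) := by push_cast; omega
        rw [ht0, PySem.List.slice_natCast lines s (s + 1 + t)]
        rw [List.drop_eq_getElem_cons hlt]
        have hmt : s + 1 + t - s = t + 1 := by omega
        rw [hmt, List.take_succ_cons]
        congr 1
        rw [scanI_eq_take, ← ht, ← hrest]
  · -- no header line matches: both return ""
    rw [dif_neg hlt]
    rw [if_neg hlt] at hstarts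
    rcases hh : (((PySem.List.enumerate lines 0).filter (fun p => matchesB kw p.2)).map (fun p => p.1)) with _ | ⟨s0, tl⟩
    · rw [hh]
      simp [PySem.Str.join, PySem.Chars.join, List.intercalate]
    · rw [hh] at hstarts; simp at hstarts
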